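-- pv_equiv track=rewrite | github.com/kumarideepali0402/ChatSleuth | core/highlight.py | highlight_matches
-- ===== SOURCE A (Python) =====
-- def highlight_matches(text : str, pattern : str) -> str:
--
--     if not pattern:
--         return text
--
--     lower_pattern = pattern.lower()
--     lower_text = text.lower()
--
--     lps = [0] * len(lower_pattern)
--     i = 0
--     j = 1
--     lps[0] = 0
--     while (j < len(lower_pattern)):
--         if (lower_pattern[j] == lower_pattern[i]) :
--             lps[j] = i + 1
--             j += 1
--             i += 1
--         else :
--             if i == 0:
--                 lps[j] = 0
--                 j += 1
--             else:
--                 i = lps[i - 1]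
--
--     i = 0
--     j = 0
--     starting_indices = []
--     while (i < len(lower_text) ) :
--         if (lower_pattern[j] == lower_text[i]) :
--             i += 1
--             j += 1
--             if (j == len(lower_pattern)) :
--                 starting_indices.append(i - j)
--                 j = lps[j - 1]
--
--         else:
--             if (j == 0):
--                 i += 1
--             else:
--                 j = lps[j - 1]
--
--     chars = list(text)
--
--     for start in reversed(starting_indices) :
--         chars.insert(start+ len(lower_pattern),"</mark>")
--         chars.insert(start,'<mark style=" color: black;">')
--
--     return ''.join(chars)
-- ===== SOURCE B (Python) =====
-- def highlight_matches(text: str, pattern: str) -> str: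
--     # No failure table: collect overlapping match starts with str.find stepping
--     # forward by 1, then splice the tag strings into the character list.
--     if not pattern:
--         return text
--
--     lower_text = text.lower()
--     lower_pattern = pattern.lower()
--
--     starts = []
--     pos = 0
--     while (i := lower_text.find(lower_pattern, pos)) != -1:
--         starts.append(i)
--         pos = i + 1
--
--     chars = list(text)
--     for start in reversed(starts):
--         chars.insert(start + len(pattern), "</mark>")
--         chars.insert(start, '<mark style=" color: black;">')
--
--     return "".join(chars)
-- ===== Notes on version B (the rewrite author's own statement) =====
-- stated objective: faster
-- what changed: Replaces A's hand-written KMP (failure-table construction plus a two-pointer automaton scan, all in interpreted Python) with a loop over str.find(lower_pattern, pos) that steps pos one past each hit to keep overlapping matches; the tag-splicing loop is unchanged.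
import Mathlib
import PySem

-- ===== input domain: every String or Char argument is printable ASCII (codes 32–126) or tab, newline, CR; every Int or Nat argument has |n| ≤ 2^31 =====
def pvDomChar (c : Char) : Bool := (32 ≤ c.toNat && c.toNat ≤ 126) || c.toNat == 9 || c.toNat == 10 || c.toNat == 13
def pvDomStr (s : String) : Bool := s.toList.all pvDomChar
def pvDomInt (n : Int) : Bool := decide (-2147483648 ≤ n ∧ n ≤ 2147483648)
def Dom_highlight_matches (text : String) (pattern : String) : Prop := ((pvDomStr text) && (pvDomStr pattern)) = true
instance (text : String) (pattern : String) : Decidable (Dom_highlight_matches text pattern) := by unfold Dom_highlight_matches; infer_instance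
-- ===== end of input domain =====

-- B replaces A's hand-written KMP (failure table + two-pointer scan) by a find-from loop
-- stepping one position past each hit; the tag-splicing loop (identical in both Pythons)
-- is the shared helper pvApplyTags.

-- ===== PORT A =====

def pvOpenTag : String := "<mark style=\" color: black;\">"
def pvCloseTag : String := "</mark>"

-- the final for-loop of both Pythons (textually identical there):
-- for start in reversed(starts): chars.insert(start+n,"</mark>"); chars.insert(start, OPEN)
def pvApplyTags (starts : List Nat) (n : Nat) (chars : List String) : List String :=
  starts.reverse.foldl
    (fun cs s => PySem.List.insert (PySem.List.insert cs ((s : Int) + (n : Int)) pvCloseTag) (s : Int) pvOpenTag)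
    chars

-- the first while loop of A (fuel is only a totality guard; 2*len+1 always suffices)
def pvLpsLoop (p : List Char) : Nat → List Nat → Nat → Nat → List Nat
  | 0, lps, _, _ => lps
  | fuel+1, lps, i, j =>
    if j < p.length then
      if p.getD j ' ' = p.getD i ' ' then
        pvLpsLoop p fuel (lps.set j (i+1)) (i+1) (j+1)
      else if i = 0 then
        pvLpsLoop p fuel (lps.set j 0) i (j+1)
      else
        pvLpsLoop p fuel lps (lps.getD (i-1) 0) j
    else lps

-- the second while loop of A (fuel is only a totality guard; 2*len+1 always suffices)
def pvKmpLoop (p : List Char) (lps : List Nat) (t : List Char) : Nat → Nat → Nat → List Nat → List Nat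
  | 0, _, _, acc => acc
  | fuel+1, i, j, acc =>
    if i < t.length then
      if p.getD j ' ' = t.getD i ' ' then
        if j + 1 = p.length then
          pvKmpLoop p lps t fuel (i+1) (lps.getD (j+1-1) 0) (acc ++ [(i+1) - (j+1)])
        else
          pvKmpLoop p lps t fuel (i+1) (j+1) acc
      else if j = 0 then
        pvKmpLoop p lps t fuel (i+1) j acc
      else
        pvKmpLoop p lps t fuel i (lps.getD (j-1) 0) acc
    else acc

def highlight_matches (text : String) (pattern : String) : String :=
  if pattern = "" then text
  else
    let lower_pattern := (PySem.Str.lower pattern).toList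
    let lower_text := (PySem.Str.lower text).toList
    let lps0 := (List.replicate lower_pattern.length 0).set 0 0
    let lps := pvLpsLoop lower_pattern (2 * lower_pattern.length + 1) lps0 0 1
    let starts := pvKmpLoop lower_pattern lps lower_text (2 * lower_text.length + 1) 0 0 []
    String.join (pvApplyTags starts lower_pattern.length (text.toList.map fun c => String.ofList [c]))

-- ===== PORT B =====

-- while (i := lower_text.find(lower_pattern, pos)) != -1: starts.append(i); pos = i + 1
-- (fuel is only a totality guard; len+1 always suffices)
def pvFindLoop (lower_text lower_pattern : List Char) : Nat → Nat → List Nat → List Nat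
  | 0, _, acc => acc
  | fuel+1, pos, acc =>
    let i := PySem.Chars.findFrom lower_text lower_pattern (pos : Int)
    if i = -1 then acc
    else pvFindLoop lower_text lower_pattern fuel (i.toNat + 1) (acc ++ [i.toNat])

def highlight_matches_alt (text : String) (pattern : String) : String :=
  if pattern = "" then text
  else
    let lower_text := (PySem.Str.lower text).toList
    let lower_pattern := (PySem.Str.lower pattern).toList
    let starts := pvFindLoop lower_text lower_pattern (lower_text.length + 1) 0 []
    String.join (pvApplyTags starts pattern.toList.length (text.toList.map fun c => String.ofList [c]))

-- ===== PRECONDITION & SPEC =====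

def Spec_highlight_matches (text : String) (pattern : String) (out : String) : Prop :=
  out = highlight_matches_alt text pattern

instance (text : String) (pattern : String) (out : String) : Decidable (Spec_highlight_matches text pattern out) := by
  unfold Spec_highlight_matches; infer_instance

-- ===== CLAIM =====

def Claim_equal_highlight_matches : Prop :=
  ∀ (text : String) (pattern : String), Dom_highlight_matches text pattern →
    Spec_highlight_matches text pattern (highlight_matches text pattern)

-- ===== LEMMAS AND PROOFS =====

-- the list of all (overlapping) occurrence starts of p in t, in increasing order,
-- cut to occurrences ending at or before position i
def pvOccUpTo (t p : List Char) (i : Nat) : List Nat :=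
  (List.range (i + 1 - p.length)).filter (fun s => decide (p <+: t.drop s))

-- b is a proper border of the length-j prefix of p
def pvBrd (p : List Char) (j b : Nat) : Prop := b < j ∧ p.take b <:+ p.take j

def pvFP (p : List Char) (j b : Nat) : Bool := decide (b < j) && decide (p.take b <:+ p.take j)

theorem pvFP_iff (p : List Char) (j b : Nat) : pvFP p j b = true ↔ pvBrd p j b := by
  simp [pvFP, pvBrd]

def pvF (p : List Char) (j : Nat) : Nat := Nat.findGreatest (fun b => pvFP p j b = true) j

theorem pvF_spec (p : List Char) (j : Nat) (hj : 1 ≤ j) : pvBrd p j (pvF p j) := by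
  have h0 : pvFP p j 0 = true := by simp [pvFP]; omega
  have h := Nat.findGreatest_spec (P := fun b => pvFP p j b = true) (Nat.zero_le j) h0
  unfold pvF
  exact (pvFP_iff _ _ _).mp h

theorem pvF_lt (p : List Char) (j : Nat) (hj : 1 ≤ j) : pvF p j < j :=
  (pvF_spec p j hj).1

theorem pvF_max (p : List Char) (j b : Nat) (hb : pvBrd p j b) : b ≤ pvF p j := by
  by_contra h
  exact Nat.findGreatest_is_greatest (P := fun b => pvFP p j b = true)
    (by unfold pvF at h; omega) (Nat.le_of_lt hb.1) ((pvFP_iff _ _ _).mpr hb)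

theorem pvSfx_of_sfx_le {a b c : List Char} (ha : a <:+ c) (hb : b <:+ c)
    (hl : a.length ≤ b.length) : a <:+ b :=
  List.suffix_of_suffix_length_le ha hb hl

theorem pvConcat_sfx_concat {xs ys : List Char} {x y : Char} :
    (xs ++ [x]) <:+ (ys ++ [y]) ↔ xs <:+ ys ∧ x = y := by
  constructor
  · intro h
    have h' := List.reverse_prefix.mpr h
    simp only [List.reverse_append, List.reverse_singleton, List.singleton_append] at h'
    rw [List.cons_prefix_cons] at h'
    exact ⟨List.reverse_prefix.mp h'.2, h'.1⟩
  · rintro ⟨⟨u, hu⟩, rfl⟩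
    exact ⟨u, by simp [← hu]⟩

-- the one-character extension step, for pattern-in-text and pattern-in-pattern alike
theorem pvStep {p t : List Char} {b i : Nat} (hb : b < p.length) (hi : i < t.length) :
    (p.take (b+1) <:+ t.take (i+1)) ↔ (p.take b <:+ t.take i ∧ p.getD b ' ' = t.getD i ' ') := by
  have hpb : p[b]?.toList = [p.getD b ' '] := by
    simp [List.getElem?_eq_getElem hb]
  have hti : t[i]?.toList = [t.getD i ' '] := by
    simp [List.getElem?_eq_getElem hi]
  rw [List.take_add_one, List.take_add_one, hpb, hti, pvConcat_sfx_concat]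

theorem pvGetD_set_ne (l : List Nat) (j m v : Nat) (h : j ≠ m) :
    (l.set j v).getD m 0 = l.getD m 0 := by
  simp [List.getD_eq_getElem?_getD, h]

theorem pvGetD_set_self (l : List Nat) (j v : Nat) (h : j < l.length) :
    (l.set j v).getD j 0 = v := by
  simp [List.getD_eq_getElem?_getD, h]

theorem pvLpsLoop_spec (p : List Char) (fuel : Nat) : ∀ (lps : List Nat) (i j : Nat),
    lps.length = p.length → 1 ≤ j → j ≤ p.length →
    (∀ m, m < j → lps.getD m 0 = pvF p (m+1)) →
    i < j → p.take i <:+ p.take j →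
    (j < p.length → ∀ b, i < b → b < j → p.take b <:+ p.take j → p.getD b ' ' ≠ p.getD j ' ') →
    2 * (p.length - j) + i < fuel →
    ∀ m, m < p.length → (pvLpsLoop p fuel lps i j).getD m 0 = pvF p (m+1) := by
  induction fuel with
  | zero => intro lps i j _ _ _ _ _ _ _ hfuel; omega
  | succ fuel ih =>
    intro lps i j hlen hj1 hjn hprev hij hbord hmax hfuel m hm
    rw [pvLpsLoop]
    by_cases hjlt : j < p.length
    · simp only [if_pos hjlt]
      by_cases heq : p.getD j ' ' = p.getD i ' '
      · simp only [if_pos heq]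
        have hbord' : p.take (i+1) <:+ p.take (j+1) :=
          (pvStep (by omega) hjlt).mpr ⟨hbord, heq.symm⟩
        have hub : ∀ b, pvBrd p (j+1) b → b ≤ i+1 := by
          rintro b ⟨hb1, hb2⟩
          rcases b with _ | c
          · omega
          · have hc : c < p.length := by omega
            have h2 := (pvStep hc hjlt).mp hb2
            by_contra hgt
            exact hmax hjlt c (by omega) (by omega) h2.1 h2.2
        have hfj : pvF p (j+1) = i + 1 :=
          le_antisymm (hub _ (pvF_spec p (j+1) (by omega))) (pvF_max p (j+1) (i+1) ⟨by omega, hbord'⟩)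
        refine ih (lps.set j (i+1)) (i+1) (j+1) (by simp [hlen]) (by omega) (by omega) ?_ (by omega)
          hbord' ?_ (by omega) m hm
        · intro m' hm'
          rcases Nat.lt_or_ge m' j with h1 | h1
          · rw [pvGetD_set_ne _ _ _ _ (by omega)]; exact hprev m' h1
          · have hm'j : m' = j := by omega
            subst hm'j
            rw [pvGetD_set_self _ _ _ (by omega), hfj]
        · intro _ b hb1 hb2 hb3 _
          have := hub b ⟨hb2, hb3⟩; omega
      · simp only [if_neg heq]
        by_cases hi0 : i = 0
        · simp only [if_pos hi0]
          subst hi0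
          have hub : ∀ b, pvBrd p (j+1) b → b = 0 := by
            rintro b ⟨hb1, hb2⟩
            rcases b with _ | c
            · rfl
            · have hc : c < p.length := by omega
              have h2 := (pvStep hc hjlt).mp hb2
              rcases Nat.eq_zero_or_pos c with h3 | h3
              · subst h3; exact (heq h2.2.symm).elim
              · exact ((hmax hjlt c h3 (by omega) h2.1) h2.2).elim
          have hfj : pvF p (j+1) = 0 := hub _ (pvF_spec p (j+1) (by omega))
          refine ih (lps.set j 0) 0 (j+1) (by simp [hlen]) (by omega) (by omega) ?_ (by omega)
            (by simp) ?_ (by omega) m hm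
          · intro m' hm'
            rcases Nat.lt_or_ge m' j with h1 | h1
            · rw [pvGetD_set_ne _ _ _ _ (by omega)]; exact hprev m' h1
            · have hm'j : m' = j := by omega
              subst hm'j
              rw [pvGetD_set_self _ _ _ (by omega), hfj]
          · intro _ b hb1 hb2 hb3 _
            have := hub b ⟨hb2, hb3⟩; omega
        · simp only [if_neg hi0]
          have hi1 : 1 ≤ i := by omega
          have hlpsi : lps.getD (i-1) 0 = pvF p i := by
            have h := hprev (i-1) (by omega)
            rwa [Nat.sub_add_cancel hi1] at h
          have hfi := pvF_spec p i hi1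
          have hfil : pvF p i < i := hfi.1
          rw [hlpsi]
          refine ih lps (pvF p i) j hlen hj1 hjn hprev (by omega) (hfi.2.trans hbord) ?_
            (by omega) m hm
          intro hjl b hb1 hb2 hb3
          rcases Nat.lt_trichotomy b i with h1 | h1 | h1
          · intro hcontra
            have hbi : p.take b <:+ p.take i :=
              pvSfx_of_sfx_le hb3 hbord (by simp only [List.length_take]; omega)
            have := pvF_max p i b ⟨h1, hbi⟩; omega
          · subst h1; exact fun hc => heq hc.symm
          · exact hmax hjl b h1 hb2 hb3
    · simp only [if_neg hjlt]
      exact hprev m (by omega)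

theorem pvSfx_iff_pfx (t p : List Char) (i : Nat) (_hn : p.length ≤ i) (hi : i ≤ t.length) :
    p <:+ t.take i ↔ p <+: t.drop (i - p.length) := by
  have hB : List.drop (i - p.length) (t.take i) = (t.drop (i - p.length)).take p.length := by
    rw [List.drop_take]; congr 1; omega
  have hlen : (t.take i).length = i := by simp; omega
  rw [List.suffix_iff_eq_drop, List.prefix_iff_eq_take, hlen, hB]

theorem pvOccUpTo_succ (t p : List Char) (i : Nat) (_hp : 1 ≤ p.length) (hi : i < t.length) :
    pvOccUpTo t p (i+1) = pvOccUpTo t p i ++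
      (if p.length ≤ i+1 ∧ p <:+ t.take (i+1) then [i+1-p.length] else []) := by
  unfold pvOccUpTo
  by_cases hni : p.length ≤ i + 1
  · have h1 : i + 1 + 1 - p.length = (i + 1 - p.length) + 1 := by omega
    rw [h1, List.range_succ, List.filter_append]
    congr 1
    have h2 : (p <+: t.drop (i + 1 - p.length)) ↔ p <:+ t.take (i+1) :=
      (pvSfx_iff_pfx t p (i+1) hni (by omega)).symm
    rw [List.filter_singleton]
    by_cases h3 : p <:+ t.take (i+1)
    · simp [h2, h3, hni]
    · simp [h2, h3]
  · have h1 : i + 1 + 1 - p.length = 0 := by omega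
    have h2 : i + 1 - p.length = 0 := by omega
    rw [h1, h2]
    simp [hni]

theorem pvKmpLoop_spec (p t : List Char) (lps : List Nat) (hp : p ≠ [])
    (hlps : ∀ m, m < p.length → lps.getD m 0 = pvF p (m+1)) (fuel : Nat) :
    ∀ (i j : Nat) (acc : List Nat),
    j ≤ i → i ≤ t.length → j < p.length →
    p.take j <:+ t.take i →
    (i < t.length → ∀ m, j < m → m < p.length → p.take m <:+ t.take i → p.getD m ' ' ≠ t.getD i ' ') →
    acc = pvOccUpTo t p i →
    2 * (t.length - i) + j < fuel →
    pvKmpLoop p lps t fuel i j acc = pvOccUpTo t p t.length := by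
  have hp1 : 1 ≤ p.length := List.length_pos_of_ne_nil hp
  induction fuel with
  | zero => intro i j acc _ _ _ _ _ _ hfuel; omega
  | succ fuel ih =>
    intro i j acc hij hit hjn hsfx hmax hacc hfuel
    rw [pvKmpLoop]
    by_cases hit' : i < t.length
    · simp only [if_pos hit']
      by_cases hchar : p.getD j ' ' = t.getD i ' '
      · simp only [if_pos hchar]
        have hsfx' : p.take (j+1) <:+ t.take (i+1) := (pvStep hjn hit').mpr ⟨hsfx, hchar⟩
        by_cases hjp : j + 1 = p.length
        · simp only [if_pos hjp]
          have htp : p.take (j+1) = p := by rw [hjp, List.take_length]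
          have hfull : p <:+ t.take (i+1) := htp ▸ hsfx'
          have hni : p.length ≤ i + 1 := by
            have h := hfull.length_le
            simp only [List.length_take] at h
            omega
          have hF := pvF_spec p p.length hp1
          have hFlt : pvF p p.length < p.length := hF.1
          have hFs : p.take (pvF p p.length) <:+ p := by
            have h := hF.2; rwa [List.take_length] at h
          have hj' : lps.getD (j+1-1) 0 = pvF p p.length := by
            have h := hlps j hjn
            simp only [Nat.add_sub_cancel]
            rw [h, hjp]
          rw [hj']
          refine ih (i+1) (pvF p p.length) (acc ++ [(i+1) - (j+1)]) (by omega) (by omega)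
            (by omega) (hFs.trans hfull) ?_ ?_ (by omega)
          · intro hit2 m hm1 hm2 hmem
            have hmp : p.take m <:+ p :=
              pvSfx_of_sfx_le hmem hfull (by simp only [List.length_take]; omega)
            have hmp' : p.take m <:+ p.take p.length := by rwa [List.take_length]
            exact absurd (pvF_max p p.length m ⟨hm2, hmp'⟩) (by omega)
          · rw [pvOccUpTo_succ t p i hp1 hit', hacc, if_pos ⟨hni, hfull⟩, hjp]
        · simp only [if_neg hjp]
          have hnomatch : ¬ (p.length ≤ i+1 ∧ p <:+ t.take (i+1)) := by
            rintro ⟨h1, h2⟩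
            have hd : (p.length - 1) + 1 = p.length := by omega
            have h2' : p.take ((p.length - 1) + 1) <:+ t.take (i+1) := by
              rw [hd, List.take_length]; exact h2
            have h3 := (pvStep (by omega) hit').mp h2'
            exact hmax hit' (p.length - 1) (by omega) (by omega) h3.1 h3.2
          refine ih (i+1) (j+1) acc (by omega) (by omega) (by omega) hsfx' ?_ ?_ (by omega)
          · intro hit2 m hm1 hm2 hmem
            have hc : m - 1 < p.length := by omega
            have hd : (m - 1) + 1 = m := by omega
            have hmem' : p.take ((m-1) + 1) <:+ t.take (i+1) := by rw [hd]; exact hmem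
            have h3 := (pvStep hc hit').mp hmem'
            exact absurd h3.2 (hmax hit' (m-1) (by omega) (by omega) h3.1)
          · rw [pvOccUpTo_succ t p i hp1 hit', hacc, if_neg hnomatch, List.append_nil]
      · simp only [if_neg hchar]
        by_cases hj0 : j = 0
        · simp only [if_pos hj0]
          have hnomatch : ¬ (p.length ≤ i+1 ∧ p <:+ t.take (i+1)) := by
            rintro ⟨h1, h2⟩
            have hd : (p.length - 1) + 1 = p.length := by omega
            have h2' : p.take ((p.length - 1) + 1) <:+ t.take (i+1) := by
              rw [hd, List.take_length]; exact h2
            have h3 := (pvStep (by omega) hit').mp h2'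
            rcases Nat.eq_zero_or_pos (p.length - 1) with h4 | h4
            · rw [h4] at h3
              exact hchar (hj0 ▸ h3.2)
            · exact hmax hit' (p.length - 1) (by omega) (by omega) h3.1 h3.2
          refine ih (i+1) j acc (by omega) (by omega) hjn (by simp [hj0]) ?_ ?_ (by omega)
          · intro hit2 m hm1 hm2 hmem
            have hc : m - 1 < p.length := by omega
            have hd : (m - 1) + 1 = m := by omega
            have hmem' : p.take ((m-1) + 1) <:+ t.take (i+1) := by rw [hd]; exact hmem
            have h3 := (pvStep hc hit').mp hmem'
            rcases Nat.eq_zero_or_pos (m - 1) with h4 | h4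
            · rw [h4] at h3
              exact absurd (hj0 ▸ h3.2 : p.getD j ' ' = t.getD i ' ') hchar
            · exact absurd h3.2 (hmax hit' (m-1) (by omega) (by omega) h3.1)
          · rw [pvOccUpTo_succ t p i hp1 hit', hacc, if_neg hnomatch, List.append_nil]
        · simp only [if_neg hj0]
          have hj1 : 1 ≤ j := by omega
          have hFj := pvF_spec p j hj1
          have hFjlt : pvF p j < j := hFj.1
          have hj' : lps.getD (j-1) 0 = pvF p j := by
            have h := hlps (j-1) (by omega)
            rwa [Nat.sub_add_cancel hj1] at h
          rw [hj']
          refine ih i (pvF p j) acc (by omega) hit (by omega) (hFj.2.trans hsfx) ?_ hacc (by omega)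
          intro hit2 m hm1 hm2 hmem
          rcases Nat.lt_trichotomy m j with h1 | h1 | h1
          · intro hcontra
            have hmj : p.take m <:+ p.take j :=
              pvSfx_of_sfx_le hmem hsfx (by simp only [List.length_take]; omega)
            have := pvF_max p j m ⟨h1, hmj⟩; omega
          · subst h1; exact hchar
          · exact hmax hit' m h1 hm2 hmem
    · simp only [if_neg hit']
      have : i = t.length := by omega
      rw [hacc, this]

theorem pvFilter_lt_ext (N a b : Nat) (P : Nat → Bool) (hab : a ≤ b) (hbN : b < N)
    (hnone : ∀ s, a ≤ s → s < b → P s = false) (hb : P b = true) :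
    (List.range N).filter (fun s => P s && decide (s < b+1)) =
      (List.range N).filter (fun s => P s && decide (s < a)) ++ [b] := by
  induction N with
  | zero => omega
  | succ N ih =>
    rw [List.range_succ, List.filter_append, List.filter_append]
    rcases Nat.lt_trichotomy b N with h1 | h1 | h1
    · have d1 : ¬ N ≤ b := by omega
      have d2 : ¬ N < a := by omega
      rw [ih h1]
      simp [d2, d1]
    · subst h1
      have e1 : (List.filter (fun s => P s && decide (s < b+1)) [b]) = [b] := by
        simp [hb]
      have e2 : (List.filter (fun s => P s && decide (s < a)) [b]) = [] := by
        have d2 : ¬ b < a := by omega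
        simp [d2]
      rw [e1, e2, List.append_nil]
      congr 1
      apply List.filter_congr
      intro s hs
      simp only [List.mem_range] at hs
      by_cases h4 : s < a
      · have h5 : s < b+1 := by omega
        simp [h4, h5]
      · have hPs : P s = false := hnone s (by omega) hs
        simp [hPs]
    · omega

theorem pvFindLoop_spec (t p : List Char) (hp : p ≠ []) (fuel : Nat) :
    ∀ (pos : Nat) (acc : List Nat),
    pos ≤ t.length →
    acc = (List.range (t.length + 1 - p.length)).filter
            (fun s => decide (p <+: t.drop s) && decide (s < pos)) →
    t.length + 1 - pos ≤ fuel →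
    pvFindLoop t p fuel pos acc = pvOccUpTo t p t.length := by
  have hp1 : 1 ≤ p.length := List.length_pos_of_ne_nil hp
  induction fuel with
  | zero => intro pos acc hpos hacc hfuel; omega
  | succ fuel ih =>
    intro pos acc hpos hacc hfuel
    simp only [pvFindLoop]
    by_cases hneg : PySem.Chars.findFrom t p (pos : Int) = -1
    · simp only [if_pos hneg]
      have hno : ¬ p <:+: t.drop pos :=
        (PySem.Chars.findFrom_natCast_eq_neg_one_iff t p pos hpos).mp hneg
      rw [hacc]
      unfold pvOccUpTo
      apply List.filter_congr
      intro s hs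
      simp only [List.mem_range] at hs
      by_cases hps : p <+: t.drop s
      · have hlt : s < pos := by
          by_contra hge
          apply hno
          have hdd : t.drop s = (t.drop pos).drop (s - pos) := by
            rw [List.drop_drop]; congr 1; omega
          rw [hdd] at hps
          exact hps.isInfix.trans (List.drop_suffix _ _).isInfix
        simp [hps, hlt]
      · simp [hps]
    · simp only [if_neg hneg]
      have hspec := PySem.Chars.findFrom_natCast_spec t p pos hpos hneg
      set fp := PySem.Chars.findFrom t p (pos : Int) with hfp
      have hposle : (pos : Int) ≤ fp := hspec.1
      have hpref : p <+: t.drop fp.toNat := hspec.2.1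
      have hmin := hspec.2.2
      have hbound : fp.toNat + p.length ≤ t.length := by
        have h := hpref.length_le
        simp only [List.length_drop] at h
        omega
      have hposle' : pos ≤ fp.toNat := by omega
      apply ih (fp.toNat + 1) (acc ++ [fp.toNat]) (by omega) ?_ (by omega)
      rw [hacc, pvFilter_lt_ext (t.length + 1 - p.length) pos fp.toNat
        (fun s => decide (p <+: t.drop s)) hposle' (by omega) ?_ (by simp [hpref])]
      intro s hs1 hs2
      simp [hmin s hs1 hs2]

theorem pvPorts_eq (text pattern : String) :
    highlight_matches text pattern = highlight_matches_alt text pattern := by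
  unfold highlight_matches highlight_matches_alt
  by_cases h0 : pattern = ""
  · simp [h0]
  · simp only [if_neg h0]
    have hPne : (PySem.Str.lower pattern).toList ≠ [] := by
      rw [PySem.Str.toList_lower]
      simp [PySem.Chars.lower]
      simpa using h0
    have hP1 : 1 ≤ (PySem.Str.lower pattern).toList.length := List.length_pos_of_ne_nil hPne
    have hPlen : (PySem.Str.lower pattern).toList.length = pattern.toList.length := by
      rw [PySem.Str.toList_lower]; simp [PySem.Chars.lower]
    set P := (PySem.Str.lower pattern).toList with hPdef
    set T := (PySem.Str.lower text).toList with hTdef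
    have hF1 : pvF P 1 = 0 := by have := pvF_lt P 1 le_rfl; omega
    have hlps : ∀ m, m < P.length →
        (pvLpsLoop P (2 * P.length + 1) ((List.replicate P.length 0).set 0 0) 0 1).getD m 0
          = pvF P (m+1) := by
      apply pvLpsLoop_spec P (2 * P.length + 1) ((List.replicate P.length 0).set 0 0) 0 1
      · simp
      · exact le_refl 1
      · exact hP1
      · intro m hm
        have hm0 : m = 0 := by omega
        subst hm0
        rw [hF1]
        simp [List.getD_eq_getElem?_getD]
      · omega
      · simp
      · intro _ b hb1 hb2 _; omega
      · omega
    have hA : pvKmpLoop P (pvLpsLoop P (2 * P.length + 1) ((List.replicate P.length 0).set 0 0) 0 1)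
        T (2 * T.length + 1) 0 0 [] = pvOccUpTo T P T.length := by
      apply pvKmpLoop_spec P T _ hPne hlps (2 * T.length + 1) 0 0 []
      · exact le_refl 0
      · exact Nat.zero_le _
      · omega
      · simp
      · intro _ m hm1 hm2 hsf
        exfalso
        rw [List.take_zero] at hsf
        have h := List.suffix_nil.mp hsf
        have hl := congrArg List.length h
        simp only [List.length_take, List.length_nil] at hl
        omega
      · have h1 : 0 + 1 - P.length = 0 := by omega
        simp [pvOccUpTo, h1]
      · omega
    have hB : pvFindLoop T P (T.length + 1) 0 [] = pvOccUpTo T P T.length := by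
      apply pvFindLoop_spec T P hPne (T.length + 1) 0 []
      · exact Nat.zero_le _
      · simp
      · omega
    rw [hA, hB, hPlen]

-- ===== VERDICT =====

theorem highlight_matches_spec : Claim_equal_highlight_matches := by
  intro text pattern _
  unfold Spec_highlight_matches
  exact pvPorts_eq text pattern
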